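-- pv_equiv track=rewrite | github.com/maciejmoskala/python | algorithms/equal_indexes_sum.py | find_equal_indexes
-- ===== SOURCE A (Python) =====
-- def equi(A):
--     lsum = 0
--     rsum = sum(A)
--     solution = []
--     for index, element in enumerate(A):
--         rsum -= element
--         if lsum == rsum:
--             solution.append(index)
--         lsum += element
--     return solution
--
-- def find_equal_indexes(A):
--     equi_for_rows = [equi(l) for l in A]
--     equi_for_cols = [equi(l) for l in zip(*A)]
--
--     solution = []
--     for col_index, ecol in enumerate(equi_for_cols):
--         for row_index in ecol:
--             if col_index in equi_for_rows[row_index]: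
--                 solution.append((col_index, row_index))
--     return solution
-- ===== SOURCE B (Python) =====
-- def find_equal_indexes(A):
--     n = len(A)
--     m = min((len(r) for r in A), default=0)
--     # P[i][j] = sum of the top-left i x j subrectangle of A
--     P = [[0] * (m + 1)]
--     for row in A:
--         prev, cur, acc = P[-1], [0], 0
--         for j in range(m):
--             acc += row[j]
--             cur.append(prev[j + 1] + acc)
--         P.append(cur)
--     row_total = [sum(row) for row in A]
--     out = []
--     for j in range(m):
--         col_total = P[n][j + 1] - P[n][j]
--         for i in range(n):
--             left = P[i + 1][j] - P[i][j]
--             top = P[i][j + 1] - P[i][j]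
--             x = A[i][j]
--             if 2 * left + x == row_total[i] and 2 * top + x == col_total:
--                 out.append((j, i))
--     return out
-- ===== Notes on version B (the rewrite author's own statement) =====
-- stated objective: alternative
-- what changed: B builds a 2D cumulative-sum table P over the n x min-row-length rectangle and enumerates every cell once in column-major order, testing both equilibrium conditions per cell in O(1) from P; A instead builds per-row and per-column equilibrium index lists and intersects them with an inner list-membership scan per candidate.
import Mathlib
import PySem

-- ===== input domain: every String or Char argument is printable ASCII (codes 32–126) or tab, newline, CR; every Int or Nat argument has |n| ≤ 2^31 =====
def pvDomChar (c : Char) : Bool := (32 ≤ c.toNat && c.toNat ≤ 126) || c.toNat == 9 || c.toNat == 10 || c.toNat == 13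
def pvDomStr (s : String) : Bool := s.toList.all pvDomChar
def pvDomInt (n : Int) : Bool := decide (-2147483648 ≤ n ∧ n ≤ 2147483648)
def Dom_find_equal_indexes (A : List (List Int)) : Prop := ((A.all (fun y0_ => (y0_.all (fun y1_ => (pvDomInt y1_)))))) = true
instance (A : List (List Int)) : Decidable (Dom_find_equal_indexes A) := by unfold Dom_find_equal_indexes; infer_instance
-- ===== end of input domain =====

-- B replaces A's per-row/per-column equilibrium index lists and the nested
-- membership intersection by a 2D cumulative-sum table and one column-major
-- scan of all cells testing both conditions in O(1); return value only,
-- neither version mutates its argument.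

-- ===== PORT A =====
-- equi(A): running left/right sums, appending equilibrium indices.
def equi (A : List Int) : List Int :=
  ((PySem.List.enumerate A 0).foldl
    (fun (st : Int × Int × List Int) ie =>
      let rsum := st.2.1 - ie.2          -- rsum -= element
      (st.1 + ie.2,                      -- lsum += element (after the test)
       rsum,
       if st.1 = rsum then st.2.2 ++ [ie.1] else st.2.2))
    (0, A.sum, [])).2.2

-- hand port of zip(*A) (tuples as lists): column j has entry A[i][j] for each row i;
-- exact because j < min row length, so getD never takes its default.
def minLen (A : List (List Int)) : Nat :=
  match A with
  | [] => 0
  | r :: rs => rs.foldl (fun m row => min m row.length) r.length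

def pyZipStar (A : List (List Int)) : List (List Int) :=
  (List.range (minLen A)).map (fun j => A.map (fun row => row.getD j 0))

def find_equal_indexes (A : List (List Int)) : List (Int × Int) :=
  let equiRows := A.map equi
  let equiCols := (pyZipStar A).map equi
  (PySem.List.enumerate equiCols 0).foldl
    (fun sol ce =>
      ce.2.foldl
        (fun sol ri =>
          if ce.1 ∈ PySem.List.pyGetD equiRows ri [] then sol ++ [(ce.1, ri)] else sol)
        sol)
    []

-- ===== PORT B =====
-- 2D cumulative-sum table, then one column-major pass testing both conditions per cell.
def find_equal_indexes_alt (A : List (List Int)) : List (Int × Int) :=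
  let n : Int := (A.length : Int)
  let m : Int := PySem.List.minD (A.map (fun r => (r.length : Int))) (fun x => x) 0
  -- P[i][j] = sum of the top-left i x j subrectangle of A
  let P : List (List Int) :=
    A.foldl (fun P row =>
      let prev := PySem.List.pyGetD P (-1) []          -- P[-1]
      let cur := ((PySem.List.pyRange 0 m 1).foldl
        (fun (st : List Int × Int) j =>
          let acc := st.2 + PySem.List.pyGetD row j 0  -- acc += row[j]
          (st.1 ++ [PySem.List.pyGetD prev (j + 1) 0 + acc], acc))
        ([0], 0)).1
      P ++ [cur])
      [List.replicate (m.toNat + 1) 0]                 -- [[0]*(m+1)]; m ≥ 0, so toNat is exact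
  let rowTotal := A.map (fun row => row.sum)
  (PySem.List.pyRange 0 m 1).foldl (fun out j =>
    let colTotal := PySem.List.pyGetD (PySem.List.pyGetD P n []) (j + 1) 0
                    - PySem.List.pyGetD (PySem.List.pyGetD P n []) j 0
    (PySem.List.pyRange 0 n 1).foldl (fun out i =>
      let left := PySem.List.pyGetD (PySem.List.pyGetD P (i + 1) []) j 0
                  - PySem.List.pyGetD (PySem.List.pyGetD P i []) j 0
      let top := PySem.List.pyGetD (PySem.List.pyGetD P i []) (j + 1) 0
                 - PySem.List.pyGetD (PySem.List.pyGetD P i []) j 0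
      let x := PySem.List.pyGetD (PySem.List.pyGetD A i []) j 0
      if 2 * left + x = PySem.List.pyGetD rowTotal i 0 ∧ 2 * top + x = colTotal
      then out ++ [(j, i)] else out) out) []

-- ===== PRECONDITION & SPEC =====
def Spec_find_equal_indexes (A : List (List Int)) (out : List (Int × Int)) : Prop := out = find_equal_indexes_alt A
instance (A : List (List Int)) (out : List (Int × Int)) : Decidable (Spec_find_equal_indexes A out) := by unfold Spec_find_equal_indexes; infer_instance

-- ===== CLAIM (what is proved, stated in full; the proofs are below) =====
def Claim_equal_find_equal_indexes : Prop := ∀ (A : List (List Int)), Dom_find_equal_indexes A → Spec_find_equal_indexes A (find_equal_indexes A)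

-- ===== LEMMAS AND PROOFS =====

-- prefix sum of a row
def pref (xs : List Int) (j : Nat) : Int := (xs.take j).sum
-- sum of the top-left (rs.length) x j rectangle
def rectD (rs : List (List Int)) (j : Nat) : Int := (rs.map (fun r => pref r j)).sum
-- one row of the table P
def rowVec (rs : List (List Int)) (m : Nat) : List Int := (List.range (m + 1)).map (rectD rs)
-- column j
def colL (A : List (List Int)) (j : Nat) : List Int := A.map (fun row => row.getD j 0)
-- canonical equilibrium-index list
def eqIdx (xs : List Int) : List Int :=
  List.map (fun (k : Nat) => (k : Int))
    ((List.range xs.length).filter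
       (fun k => decide (2 * pref xs k + xs.getD k 0 = xs.sum)))

lemma pref_succ (xs : List Int) (k : Nat) : pref xs (k + 1) = pref xs k + xs.getD k 0 := by
  simp only [pref, List.take_succ, List.sum_append, List.getD_eq_getElem?_getD]
  cases h : xs[k]? <;> simp [h]

lemma filterMap_if {α β : Type} (p : α → Prop) [DecidablePred p] (g : α → β) (l : List α) :
    l.filterMap (fun k => if p k then some (g k) else none) = (l.filter (fun k => decide (p k))).map g := by
  induction l with
  | nil => rfl
  | cons a l ih =>
    by_cases h : p a <;> simp [List.filterMap_cons, List.filter_cons, h, ih]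

lemma equiB_fold (xs : List Int) : ∀ (t s pre : Int) (sol : List Int),
    ((PySem.List.enumerate xs s).foldl
       (fun (st : List Int × Int) ix =>
         (if 2 * st.2 + ix.2 = t then st.1 ++ [ix.1] else st.1, st.2 + ix.2))
       (sol, pre)).1
    = sol ++ (List.range xs.length).filterMap
        (fun k => if 2 * (pre + (xs.take k).sum) + xs.getD k 0 = t then some (s + (k : Int)) else none) := by
  induction xs with
  | nil => intro t s pre sol; simp [PySem.List.enumerate_nil]
  | cons x rest ih =>
    intro t s pre sol
    rw [PySem.List.enumerate_cons, List.foldl_cons]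
    simp only [List.length_cons, List.range_succ_eq_map, List.filterMap_cons, List.filterMap_map]
    rw [ih]
    simp only [List.take_zero, List.sum_nil, List.getD_cons_zero, Function.comp_def,
      List.take_succ_cons, List.sum_cons, List.getD_cons_succ]
    by_cases h : 2 * pre + x = t
    · rw [if_pos (by omega : 2 * (pre + 0) + x = t)]
      simp only [if_pos h, List.cons_append, List.nil_append, List.append_assoc, Nat.succ_eq_add_one]
      congr 1
      congr 1
      · simp
      · apply List.filterMap_congr
        intro k _
        have e1 : pre + (x + (rest.take k).sum) = pre + x + (rest.take k).sum := by ring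
        have e2 : s + (((k + 1 : Nat)) : Int) = s + 1 + (k : Int) := by push_cast; ring
        rw [e1, e2]
    · rw [if_neg (by omega : ¬ (2 * (pre + 0) + x = t))]
      simp only [if_neg h, Nat.succ_eq_add_one]
      congr 1
      apply List.filterMap_congr
      intro k _
      have e1 : pre + (x + (rest.take k).sum) = pre + x + (rest.take k).sum := by ring
      have e2 : s + (((k + 1 : Nat)) : Int) = s + 1 + (k : Int) := by push_cast; ring
      rw [e1, e2]

lemma equi_fold (rest : List (Int × Int)) : ∀ (t l : Int) (sol : List Int),
    (rest.foldl
      (fun (st : Int × Int × List Int) ie =>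
        let rsum := st.2.1 - ie.2
        (st.1 + ie.2, rsum,
         if st.1 = rsum then st.2.2 ++ [ie.1] else st.2.2))
      (l, t - l, sol)).2.2
    = (rest.foldl
       (fun (st : List Int × Int) ix =>
         (if 2 * st.2 + ix.2 = t then st.1 ++ [ix.1] else st.1, st.2 + ix.2))
       (sol, l)).1 := by
  induction rest with
  | nil => intro t l sol; rfl
  | cons ie rest ih =>
    intro t l sol
    simp only [List.foldl_cons]
    have e1 : t - l - ie.2 = t - (l + ie.2) := by ring
    have e2 : (if l = t - l - ie.2 then sol ++ [ie.1] else sol)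
        = (if 2 * l + ie.2 = t then sol ++ [ie.1] else sol) := by
      split_ifs with h1 h2 <;> first | rfl | omega
    rw [e1] at e2 ⊢
    rw [e2]
    exact ih t (l + ie.2) _

lemma equi_eq_eqIdx (xs : List Int) : equi xs = eqIdx xs := by
  have h : (((0 : Int), xs.sum, ([] : List Int)) : Int × Int × List Int)
      = ((0 : Int), xs.sum - 0, ([] : List Int)) := by norm_num
  unfold equi
  rw [h, equi_fold, equiB_fold]
  simp only [List.nil_append, zero_add]
  rw [filterMap_if (fun k => 2 * (xs.take k).sum + xs.getD k 0 = xs.sum) (fun k => (k : Int))]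
  simp [eqIdx, pref]

lemma cast_foldl_min (rs : List (List Int)) : ∀ a : Nat,
    (rs.map (fun r => (r.length : Int))).foldl min ((a : Nat) : Int)
      = ((rs.foldl (fun m row => min m row.length) a : Nat) : Int) := by
  induction rs with
  | nil => intro a; rfl
  | cons r rs ih =>
    intro a
    rw [List.map_cons, List.foldl_cons, List.foldl_cons, ← Nat.cast_min, ih]

lemma ncols_eq (A : List (List Int)) :
    PySem.List.minD (A.map (fun r => (r.length : Int))) (fun x => x) 0 = (minLen A : Int) := by
  cases A with
  | nil => rfl
  | cons r rs =>
    rw [List.map_cons, PySem.List.minD, PySem.List.min?_id_cons, Option.getD_some]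
    simp only [minLen]
    exact cast_foldl_min rs r.length

lemma foldl_min_le_init (rs : List (List Int)) : ∀ a : Nat,
    rs.foldl (fun m row => min m row.length) a ≤ a := by
  induction rs with
  | nil => intro a; simp
  | cons s rs ih =>
    intro a
    simp only [List.foldl_cons]
    exact le_trans (ih _) (by omega)

lemma foldl_min_le (rs : List (List Int)) : ∀ (a : Nat) (k : Nat) (hk : k < rs.length),
    rs.foldl (fun m row => min m row.length) a ≤ rs[k].length := by
  induction rs with
  | nil => intro a k hk; simp at hk
  | cons r rs ih =>
    intro a k hk
    cases k with
    | zero =>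
      simp only [List.foldl_cons, List.getElem_cons_zero]
      exact le_trans (foldl_min_le_init rs _) (by omega)
    | succ k => exact ih _ k (by simpa using hk)

lemma minLen_le (A : List (List Int)) (k : Nat) (hk : k < A.length) :
    minLen A ≤ (A.getD k []).length := by
  rw [List.getD_eq_getElem _ _ hk]
  cases A with
  | nil => simp at hk
  | cons r rs =>
    simp only [minLen]
    cases k with
    | zero =>
      simp only [List.getElem_cons_zero]
      exact le_trans (foldl_min_le_init rs _) (by omega)
    | succ k => exact foldl_min_le rs r.length k (by simpa using hk)

lemma inner_fold (row prev : List Int) (m : Nat) :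
    ((PySem.List.pyRange 0 (m : Int) 1).foldl
        (fun (st : List Int × Int) j =>
          let acc := st.2 + PySem.List.pyGetD row j 0
          (st.1 ++ [PySem.List.pyGetD prev (j + 1) 0 + acc], acc))
        ([0], 0))
    = ((0 : Int) :: (List.range m).map (fun k => prev.getD (k + 1) 0 + pref row (k + 1)),
       pref row m) := by
  induction m with
  | zero => simp [PySem.List.pyRange_one_eq_nil, pref]
  | succ m ih =>
    have hc : ((m + 1 : Nat) : Int) = (m : Int) + 1 := by push_cast; ring
    rw [hc, PySem.List.pyRange_one_succ_right (by positivity), List.foldl_append, ih]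
    simp only [List.foldl_cons, List.foldl_nil, PySem.List.pyGetD_natCast]
    have hc2 : ((m : Int) + 1) = ((m + 1 : Nat) : Int) := by push_cast; ring
    rw [hc2, PySem.List.pyGetD_natCast]
    rw [List.range_succ, List.map_append]
    simp [pref_succ]

lemma P_fold_inv (m : Nat) : ∀ (rs done : List (List Int)),
    rs.foldl (fun P row =>
      let prev := PySem.List.pyGetD P (-1) []
      let cur := ((PySem.List.pyRange 0 (m : Int) 1).foldl
        (fun (st : List Int × Int) j =>
          let acc := st.2 + PySem.List.pyGetD row j 0
          (st.1 ++ [PySem.List.pyGetD prev (j + 1) 0 + acc], acc))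
        ([0], 0)).1
      P ++ [cur])
      ((List.range (done.length + 1)).map (fun i => rowVec (done.take i) m))
    = (List.range (done.length + rs.length + 1)).map (fun i => rowVec ((done ++ rs).take i) m) := by
  intro rs
  induction rs with
  | nil => intro done; simp
  | cons row rs ih =>
    intro done
    simp only [List.foldl_cons]
    have hne : (List.range (done.length + 1)).map (fun i => rowVec (done.take i) m) ≠ [] := by
      simp
    have hprev : PySem.List.pyGetD
        ((List.range (done.length + 1)).map (fun i => rowVec (done.take i) m)) (-1) []
        = rowVec done m := by
      rw [PySem.List.pyGetD_neg_one _ _ hne, List.getLast_eq_getElem]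
      simp
    rw [hprev]
    have hcur : (((PySem.List.pyRange 0 (m : Int) 1).foldl
        (fun (st : List Int × Int) j =>
          let acc := st.2 + PySem.List.pyGetD row j 0
          (st.1 ++ [PySem.List.pyGetD (rowVec done m) (j + 1) 0 + acc], acc))
        ([0], 0)).1)
        = rowVec (done ++ [row]) m := by
      rw [inner_fold]
      show _ = (List.range (m + 1)).map (rectD (done ++ [row]))
      rw [List.range_succ_eq_map, List.map_cons, List.map_map]
      refine List.cons_eq_cons.mpr ⟨by simp [rectD, pref], ?_⟩
      apply List.map_congr_left
      intro k hk
      rw [List.mem_range] at hk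
      have hg : (rowVec done m)[k + 1]?.getD 0 = rectD done (k + 1) := by
        rw [rowVec, List.getElem?_map, List.getElem?_range (by omega)]
        rfl
      simp only [List.getD_eq_getElem?_getD, hg]
      simp [rectD, pref]
    rw [hcur]
    have hnext : ((List.range (done.length + 1)).map (fun i => rowVec (done.take i) m))
          ++ [rowVec (done ++ [row]) m]
        = (List.range ((done ++ [row]).length + 1)).map
            (fun i => rowVec ((done ++ [row]).take i) m) := by
      simp only [List.length_append, List.length_cons, List.length_nil, Nat.add_zero]
      conv_rhs => rw [List.range_succ]
      rw [List.map_append]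
      congr 1
      · apply List.map_congr_left
        intro i hi
        rw [List.mem_range] at hi
        rw [List.take_append_of_le_length (by omega)]
      · have ht : (done ++ [row]).take (done.length + 1) = done ++ [row] :=
          List.take_of_length_le (by simp)
        simp [ht]
    rw [hnext, ih (done ++ [row])]
    have hlen : (done ++ [row]).length + rs.length + 1 = done.length + (row :: rs).length + 1 := by
      simp only [List.length_append, List.length_cons, List.length_nil]
      omega
    rw [List.append_assoc, List.singleton_append, hlen]

lemma P_closed (A : List (List Int)) (m : Nat) :
    A.foldl (fun P row =>
      let prev := PySem.List.pyGetD P (-1) []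
      let cur := ((PySem.List.pyRange 0 (m : Int) 1).foldl
        (fun (st : List Int × Int) j =>
          let acc := st.2 + PySem.List.pyGetD row j 0
          (st.1 ++ [PySem.List.pyGetD prev (j + 1) 0 + acc], acc))
        ([0], 0)).1
      P ++ [cur])
      [List.replicate (m + 1) 0]
    = (List.range (A.length + 1)).map (fun i => rowVec (A.take i) m) := by
  have h0 : [List.replicate (m + 1) 0]
      = (List.range ((([] : List (List Int))).length + 1)).map
          (fun i => rowVec (([] : List (List Int)).take i) m) := by
    simp only [List.take_nil, List.length_nil, Nat.zero_add, List.range_one,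
      List.map_cons, List.map_nil]
    congr 1
    rw [rowVec,
      List.map_congr_left (fun j _ => by simp [rectD] : ∀ j ∈ List.range (m + 1),
        rectD ([] : List (List Int)) j = (fun _ => (0 : Int)) j)]
    simp [List.map_const']
  rw [h0, P_fold_inv m A []]
  simp

-- row k and column j conditions, as predicates on the cell
def prowB (A : List (List Int)) (k j : Nat) : Bool :=
  decide (2 * pref (A.getD k []) j + (A.getD k []).getD j 0 = (A.getD k []).sum)
def pcolB (A : List (List Int)) (k j : Nat) : Bool :=
  decide (2 * pref (colL A j) k + (colL A j).getD k 0 = (colL A j).sum)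

def canon (A : List (List Int)) : List (Int × Int) :=
  (List.range (minLen A)).flatMap (fun (j : Nat) =>
    List.map (fun (k : Nat) => (((j : Int), (k : Int)) : Int × Int))
      ((List.range A.length).filter (fun k => prowB A k j && pcolB A k j)))

lemma enumerate_map {α β : Type} (f : α → β) (l : List α) : ∀ s : Int,
    PySem.List.enumerate (l.map f) s = (PySem.List.enumerate l s).map (fun p => (p.1, f p.2)) := by
  induction l with
  | nil => intro s; simp [PySem.List.enumerate_nil]
  | cons a l ih =>
    intro s
    rw [List.map_cons, PySem.List.enumerate_cons, PySem.List.enumerate_cons, List.map_cons, ih]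

lemma enumerate_range (M : Nat) : ∀ s : Int,
    PySem.List.enumerate (List.range M) s
      = (List.range M).map (fun (k : Nat) => ((s + (k : Int), k) : Int × Nat)) := by
  induction M with
  | zero => intro s; simp [PySem.List.enumerate_nil]
  | succ M ih =>
    intro s
    rw [List.range_succ, PySem.List.enumerate_append, ih, List.map_append]
    simp [PySem.List.enumerate_cons, PySem.List.enumerate_nil]

lemma enumerate_range_map {β : Type} (g : Nat → β) (M : Nat) :
    PySem.List.enumerate ((List.range M).map g) 0
      = (List.range M).map (fun (k : Nat) => (((k : Int), g k) : Int × β)) := by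
  rw [enumerate_map, enumerate_range, List.map_map]
  simp [Function.comp_def]

lemma A_flat (A : List (List Int)) :
    find_equal_indexes A
    = (PySem.List.enumerate ((pyZipStar A).map equi) 0).flatMap
        (fun ce =>
          (ce.2.filter (fun ri => decide (ce.1 ∈ PySem.List.pyGetD (A.map equi) ri []))).map
            (fun ri => (ce.1, ri))) := by
  simp only [find_equal_indexes]
  have hin : (fun (sol : List (Int × Int)) (ce : Int × List Int) =>
        ce.2.foldl
          (fun sol ri =>
            if ce.1 ∈ PySem.List.pyGetD (A.map equi) ri [] then sol ++ [(ce.1, ri)] else sol)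
          sol)
      = (fun (sol : List (Int × Int)) (ce : Int × List Int) =>
          sol ++ (ce.2.filter (fun ri => decide (ce.1 ∈ PySem.List.pyGetD (A.map equi) ri []))).map
            (fun ri => (ce.1, ri))) := by
    funext sol ce
    exact PySem.List.foldl_append_ite _ _ _ _
  rw [hin, PySem.List.foldl_append_eq_flatMap]
  simp

lemma mem_eqIdx_iff (xs : List Int) (j : Nat) (hj : j < xs.length) :
    ((j : Int) ∈ eqIdx xs) ↔ (2 * pref xs j + xs.getD j 0 = xs.sum) := by
  rw [eqIdx]
  constructor
  · intro h
    obtain ⟨k, hk, hkj⟩ := List.mem_map.1 h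
    obtain ⟨hkr, hc⟩ := List.mem_filter.1 hk
    have : k = j := by exact_mod_cast hkj
    subst this
    exact of_decide_eq_true hc
  · intro hc
    exact List.mem_map.2 ⟨j, List.mem_filter.2 ⟨List.mem_range.2 hj, decide_eq_true hc⟩, rfl⟩

lemma getD_map_cast {α β : Type} [Inhabited β] (f : α → β) (A : List α) (k : Nat)
    (hk : k < A.length) (dA : α) (dB : β) :
    (A.map f).getD k dB = f (A.getD k dA) := by
  rw [List.getD_eq_getElem _ _ (by simpa using hk), List.getD_eq_getElem _ _ hk]
  simp

lemma flatMap_congr_mem {α β : Type} {l : List α} {f g : α → List β}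
    (h : ∀ a ∈ l, f a = g a) : l.flatMap f = l.flatMap g := by
  induction l with
  | nil => rfl
  | cons a l ih =>
    rw [List.flatMap_cons, List.flatMap_cons, h a (by simp), ih (fun a ha => h a (by simp [ha]))]

lemma flatMap_map {α β γ : Type} (g : α → β) (F : β → List γ) (l : List α) :
    (l.map g).flatMap F = l.flatMap (fun x => F (g x)) := by
  induction l with
  | nil => rfl
  | cons a l ih => rw [List.map_cons, List.flatMap_cons, List.flatMap_cons, ih]

lemma col_length (A : List (List Int)) (j : Nat) : (colL A j).length = A.length := by
  simp [colL]

lemma A_canon (A : List (List Int)) : find_equal_indexes A = canon A := by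
  rw [A_flat]
  have hzip : (pyZipStar A).map equi = (List.range (minLen A)).map (fun j => equi (colL A j)) := by
    rw [pyZipStar, List.map_map]
    rfl
  rw [hzip, enumerate_range_map, flatMap_map, canon]
  apply flatMap_congr_mem
  intro j hj
  rw [List.mem_range] at hj
  show ((equi (colL A j)).filter
      (fun ri => decide (((j : Nat) : Int) ∈ PySem.List.pyGetD (A.map equi) ri []))).map
      (fun ri => (((j : Nat) : Int), ri))
    = ((List.range A.length).filter (fun k => prowB A k j && pcolB A k j)).map
      (fun (k : Nat) => ((((j : Nat) : Int), ((k : Nat) : Int)) : Int × Int))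
  rw [equi_eq_eqIdx, eqIdx, col_length, List.filter_map, List.map_map, List.filter_filter]
  refine congrArg (List.map _) (List.filter_congr ?_)
  intro k hk
  rw [List.mem_range] at hk
  have hrow : PySem.List.pyGetD (A.map equi) ((k : Nat) : Int) [] = equi (A.getD k []) := by
    rw [PySem.List.pyGetD_natCast]
    exact getD_map_cast equi A k hk [] []
  simp only [Function.comp_def, hrow, equi_eq_eqIdx]
  have hjlen : j < (A.getD k []).length := lt_of_lt_of_le hj (minLen_le A k hk)
  congr 1
  exact decide_eq_decide.mpr (mem_eqIdx_iff _ j hjlen)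

lemma rectD_succ (rs : List (List Int)) (j : Nat) :
    rectD rs (j + 1) = rectD rs j + (rs.map (fun r => r.getD j 0)).sum := by
  simp only [rectD, pref_succ]
  rw [PySem.List.sum_map_add_int]

lemma P_at (A : List (List Int)) (m k : Nat) (hk : k ≤ A.length) :
    PySem.List.pyGetD ((List.range (A.length + 1)).map (fun i => rowVec (A.take i) m)) ((k : Int)) []
      = rowVec (A.take k) m := by
  rw [PySem.List.pyGetD_natCast, List.getD_eq_getElem _ _ (by simp; omega)]
  simp

lemma rowVec_at (rs : List (List Int)) (m j : Nat) (hj : j ≤ m) :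
    PySem.List.pyGetD (rowVec rs m) ((j : Int)) 0 = rectD rs j := by
  rw [PySem.List.pyGetD_natCast, rowVec, List.getD_eq_getElem _ _ (by simp; omega)]
  simp

lemma left_eq (A : List (List Int)) (j k : Nat) (hk : k < A.length) :
    rectD (A.take (k + 1)) j - rectD (A.take k) j = pref (A.getD k []) j := by
  have ht : A.take (k + 1) = A.take k ++ [A.getD k []] := by
    rw [List.take_add_one, List.getD_eq_getElem _ _ hk]
    simp [List.getElem?_eq_getElem hk]
  rw [ht]
  simp [rectD]

lemma top_eq (A : List (List Int)) (j k : Nat) :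
    rectD (A.take k) (j + 1) - rectD (A.take k) j = pref (colL A j) k := by
  rw [rectD_succ]
  simp [pref, colL, List.map_take]

lemma colTot_eq (A : List (List Int)) (j : Nat) :
    rectD A (j + 1) - rectD A j = (colL A j).sum := by
  rw [rectD_succ]
  simp [colL]

lemma B_canon (A : List (List Int)) : find_equal_indexes_alt A = canon A := by
  simp only [find_equal_indexes_alt, ncols_eq, Int.toNat_natCast]
  rw [P_closed A (minLen A)]
  simp only [PySem.List.foldl_append_ite, PySem.List.foldl_append_eq_flatMap, List.nil_append]
  rw [PySem.List.pyRange_zero_natCast, PySem.List.pyRange_zero_natCast, flatMap_map, canon]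
  apply flatMap_congr_mem
  intro jn hjn
  rw [List.mem_range] at hjn
  rw [List.filter_map, List.map_map]
  refine congrArg (List.map _) (List.filter_congr ?_)
  intro k hk
  rw [List.mem_range] at hk
  simp only [Function.comp_def]
  rw [show ((k : Int) + 1) = ((k + 1 : Nat) : Int) from by push_cast; ring,
      show ((jn : Int) + 1) = ((jn + 1 : Nat) : Int) from by push_cast; ring]
  rw [P_at A (minLen A) (k + 1) (by omega), P_at A (minLen A) k (by omega),
      P_at A (minLen A) A.length le_rfl, List.take_length]
  rw [rowVec_at (A.take (k + 1)) (minLen A) jn (by omega),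
      rowVec_at (A.take k) (minLen A) jn (by omega),
      rowVec_at (A.take k) (minLen A) (jn + 1) (by omega),
      rowVec_at A (minLen A) jn (by omega),
      rowVec_at A (minLen A) (jn + 1) (by omega)]
  rw [PySem.List.pyGetD_natCast A, PySem.List.pyGetD_natCast (A.getD k []),
      PySem.List.pyGetD_natCast (A.map (fun row => row.sum))]
  rw [getD_map_cast (fun row => row.sum) A k hk [] 0]
  rw [left_eq A jn k hk, top_eq A jn k, colTot_eq A jn]
  have hx : (colL A jn).getD k 0 = (A.getD k []).getD jn 0 := by
    rw [colL]
    exact getD_map_cast (fun row => row.getD jn 0) A k hk [] 0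
  rw [prowB, pcolB, hx, ← Bool.decide_and]

-- ===== VERDICT (by name: the statement is the Claim_ definition above) =====
theorem find_equal_indexes_spec : Claim_equal_find_equal_indexes := by
  intro A _
  show find_equal_indexes A = find_equal_indexes_alt A
  rw [A_canon, B_canon]
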